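-- pv_equiv track=rewrite | github.com/jackodon/SystemdTimer-LinuxPersistenceStash | stacheinfo.py | stat_mode_to_rwx
-- ===== SOURCE A (Python) =====
-- import stat
--
-- def stat_mode_to_rwx(mode: int) -> str:
--     # Only owner/group/other rwx bits
--     perms = ""
--     mapping = (
--         (stat.S_IRUSR, "r"), (stat.S_IWUSR, "w"), (stat.S_IXUSR, "x"),
--         (stat.S_IRGRP, "r"), (stat.S_IWGRP, "w"), (stat.S_IXGRP, "x"),
--         (stat.S_IROTH, "r"), (stat.S_IWOTH, "w"), (stat.S_IXOTH, "x"),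
--     )
--     for bit, ch in mapping:
--         perms += ch if (mode & bit) else "-"
--     return perms
-- ===== SOURCE B (Python) =====
-- PERM = ("---", "--x", "-w-", "-wx", "r--", "r-x", "rw-", "rwx")
--
-- def stat_mode_to_rwx(mode: int) -> str:
--     # Table lookup per octal digit: owner/group/other at shifts 6/3/0.
--     out = ""
--     for shift in (6, 3, 0):
--         out += PERM[(mode >> shift) & 7]
--     return out
-- ===== Notes on version B (the rewrite author's own statement) =====
-- stated objective: idiomatic
-- what changed: Replaces nine individual stat-bit tests with a precomputed table of the 8 three-character permission strings, indexed by each octal digit of the mode ((mode >> shift) & 7 for shifts 6, 3, 0).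
import Mathlib
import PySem

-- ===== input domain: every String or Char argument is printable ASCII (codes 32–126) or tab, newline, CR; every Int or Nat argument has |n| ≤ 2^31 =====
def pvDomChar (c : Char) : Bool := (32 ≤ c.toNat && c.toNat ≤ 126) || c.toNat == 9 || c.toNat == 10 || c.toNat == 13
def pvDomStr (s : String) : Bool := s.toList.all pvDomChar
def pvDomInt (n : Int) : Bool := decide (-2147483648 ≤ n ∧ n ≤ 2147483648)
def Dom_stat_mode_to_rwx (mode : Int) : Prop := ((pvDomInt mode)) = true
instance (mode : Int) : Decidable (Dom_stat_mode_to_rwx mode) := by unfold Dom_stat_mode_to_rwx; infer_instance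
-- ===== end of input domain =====

-- B replaces A's nine individual permission-bit tests by a lookup of each octal
-- digit of the mode in a precomputed table of the 8 three-character strings (idiomatic).


-- ===== PORT A =====
-- stat.S_IRUSR = 256, S_IWUSR = 128, S_IXUSR = 64, S_IRGRP = 32, S_IWGRP = 16,
-- S_IXGRP = 8, S_IROTH = 4, S_IWOTH = 2, S_IXOTH = 1 (the tuple 'mapping').
def stat_mode_to_rwx (mode : Int) : String :=
  let mapping : List (Int × String) :=
    [(256, "r"), (128, "w"), (64, "x"),
     (32, "r"), (16, "w"), (8, "x"),
     (4, "r"), (2, "w"), (1, "x")]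
  mapping.foldl
    (fun perms bc => perms ++ (if PySem.Int.band mode bc.1 ≠ 0 then bc.2 else "-")) ""

-- ===== PORT B =====
def pvPERM : List String := ["---", "--x", "-w-", "-wx", "r--", "r-x", "rw-", "rwx"]

-- '(mode >> shift) & 7' is always 0..7, so the PERM[...] indexing never raises;
-- pyGetD with default "" is that lookup made total.
def stat_mode_to_rwx_alt (mode : Int) : String :=
  [6, 3, 0].foldl
    (fun out (shift : Nat) => out ++ PySem.List.pyGetD pvPERM (PySem.Int.band (mode >>> shift) 7) "") ""

-- ===== PRECONDITION & SPEC =====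
def Spec_stat_mode_to_rwx (mode : Int) (out : String) : Prop := out = stat_mode_to_rwx_alt mode
instance (mode : Int) (out : String) : Decidable (Spec_stat_mode_to_rwx mode out) := by unfold Spec_stat_mode_to_rwx; infer_instance

-- ===== CLAIM (what is proved, stated in full; the proofs are below) =====
def Claim_equal_stat_mode_to_rwx : Prop := ∀ (mode : Int), Dom_stat_mode_to_rwx mode → Spec_stat_mode_to_rwx mode (stat_mode_to_rwx mode)

-- ===== LEMMAS AND PROOFS =====

-- Python's m & 2^k, in terms of floor division and modulus.
theorem band_two_pow (m : Int) (k : Nat) :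
    PySem.Int.band m (2 ^ k) = m / 2 ^ k % 2 * 2 ^ k := by
  have hp : (0:Int) < 2 ^ k := by positivity
  have hcast : ((2:Int) ^ k).toNat = 2 ^ k := by
    rw [show ((2:Int) ^ k) = ((2 ^ k : Nat) : Int) by push_cast; ring]
    exact Int.toNat_natCast _
  unfold PySem.Int.band
  by_cases hm : 0 ≤ m
  · simp only [hm, if_true, if_pos (le_of_lt hp), hcast]
    rw [Nat.and_two_pow, Nat.testBit_eq_decide_div_mod_eq]
    have hdiv : m / 2 ^ k = ((m.toNat / 2 ^ k : Nat) : Int) := by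
      rw [Int.natCast_ediv]
      simp [Int.toNat_of_nonneg hm]
    by_cases hb : m.toNat / 2 ^ k % 2 = 1
    · have : m / 2 ^ k % 2 = 1 := by
        rw [hdiv]; omega
      simp [hb, this]
    · have h0 : m.toNat / 2 ^ k % 2 = 0 := by omega
      have : m / 2 ^ k % 2 = 0 := by
        rw [hdiv]; omega
      simp [hb, this]
  · simp only [hm, if_false, if_pos (le_of_lt hp), hcast]
    set t : Nat := (-m - 1).toNat with ht
    have htm : (t : Int) = -m - 1 := by
      rw [ht]; rw [Int.toNat_of_nonneg (by omega)]
    have hand : 2 ^ k &&& t = (t.testBit k).toNat * 2 ^ k := by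
      rw [Nat.and_comm, Nat.and_two_pow]
    -- m / 2^k = -(t / 2^k) - 1  and the bit flips
    have hq : m / 2 ^ k = -((t : Int) / 2 ^ k) - 1 := by
      have h1 : (t : Int) = 2 ^ k * ((t : Int) / 2 ^ k) + (t : Int) % 2 ^ k :=
        (Int.mul_ediv_add_emod _ _).symm
      have h2 : 0 ≤ (t : Int) % 2 ^ k := Int.emod_nonneg _ (by omega)
      have h3 : (t : Int) % 2 ^ k < 2 ^ k := Int.emod_lt_of_pos _ hp
      have hexp : (2:Int) ^ k * (-((t : Int) / 2 ^ k) - 1)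
          = -((2:Int) ^ k * ((t : Int) / 2 ^ k)) - 2 ^ k := by ring
      have := (Int.ediv_emod_unique (a := m) (b := 2 ^ k)
        (r := 2 ^ k - 1 - (t : Int) % 2 ^ k) (q := -((t : Int) / 2 ^ k) - 1) hp).mpr
        ⟨by rw [hexp]; omega, by omega, by omega⟩
      exact this.1
    have hqt : ((t / 2 ^ k : Nat) : Int) = (t : Int) / 2 ^ k := by
      rw [Int.natCast_ediv]
      rw [show ((2:Int) ^ k) = ((2 ^ k : Nat) : Int) by push_cast; ring]
    rw [hand, Nat.testBit_eq_decide_div_mod_eq]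
    by_cases hb : t / 2 ^ k % 2 = 1
    · have : m / 2 ^ k % 2 = 0 := by rw [hq]; omega
      simp [hb, this]
    · have h0 : t / 2 ^ k % 2 = 0 := by omega
      have : m / 2 ^ k % 2 = 1 := by rw [hq]; omega
      simp [hb, this]

-- Python's m & 7 is m mod 8 (floor/Python modulus).
theorem band_seven (m : Int) : PySem.Int.band m 7 = m % 8 := by
  unfold PySem.Int.band
  by_cases hm : 0 ≤ m
  · simp only [hm, if_true, show (0:Int) ≤ 7 by norm_num, if_true]
    have h7 : (7 : Int).toNat = 7 := rfl
    rw [h7, show (7:Nat) = 2 ^ 3 - 1 from rfl, Nat.and_two_pow_sub_one_eq_mod]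
    have : m = ((m.toNat : Nat) : Int) := by simp [Int.toNat_of_nonneg hm]
    rw [this]
    push_cast
    omega
  · simp only [hm, if_false, show (0:Int) ≤ 7 by norm_num, if_true]
    set t : Nat := (-m - 1).toNat with ht
    have htm : (t : Int) = -m - 1 := by
      rw [ht]; rw [Int.toNat_of_nonneg (by omega)]
    have hand : (7 : Int).toNat &&& t = t % 8 := by
      show 7 &&& t = t % 8
      rw [Nat.and_comm, show (7:Nat) = 2 ^ 3 - 1 from rfl, Nat.and_two_pow_sub_one_eq_mod]
    rw [hand]
    have hle : t % 8 ≤ 7 := by omega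
    push_cast [Nat.sub_le_iff_le_add]
    omega

-- Specialisations of band_two_pow at the nine permission bits.
theorem band256 (m : Int) : PySem.Int.band m 256 = m / 256 % 2 * 256 := by
  have := band_two_pow m 8; norm_num at this; exact this
theorem band128 (m : Int) : PySem.Int.band m 128 = m / 128 % 2 * 128 := by
  have := band_two_pow m 7; norm_num at this; exact this
theorem band64 (m : Int) : PySem.Int.band m 64 = m / 64 % 2 * 64 := by
  have := band_two_pow m 6; norm_num at this; exact this
theorem band32 (m : Int) : PySem.Int.band m 32 = m / 32 % 2 * 32 := by
  have := band_two_pow m 5; norm_num at this; exact this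
theorem band16 (m : Int) : PySem.Int.band m 16 = m / 16 % 2 * 16 := by
  have := band_two_pow m 4; norm_num at this; exact this
theorem band8 (m : Int) : PySem.Int.band m 8 = m / 8 % 2 * 8 := by
  have := band_two_pow m 3; norm_num at this; exact this
theorem band4 (m : Int) : PySem.Int.band m 4 = m / 4 % 2 * 4 := by
  have := band_two_pow m 2; norm_num at this; exact this
theorem band2 (m : Int) : PySem.Int.band m 2 = m / 2 % 2 * 2 := by
  have := band_two_pow m 1; norm_num at this; exact this
theorem band1 (m : Int) : PySem.Int.band m 1 = m % 2 := by
  have := band_two_pow m 0; norm_num at this; exact this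

-- A only reads the low 9 bits of the mode.
theorem A_mod512 (m : Int) : stat_mode_to_rwx m = stat_mode_to_rwx (m % 512) := by
  simp only [stat_mode_to_rwx, List.foldl,
    band256, band128, band64, band32, band16, band8, band4, band2, band1]
  have h256 : m / 256 % 2 = m % 512 / 256 % 2 := by omega
  have h128 : m / 128 % 2 = m % 512 / 128 % 2 := by omega
  have h64 : m / 64 % 2 = m % 512 / 64 % 2 := by omega
  have h32 : m / 32 % 2 = m % 512 / 32 % 2 := by omega
  have h16 : m / 16 % 2 = m % 512 / 16 % 2 := by omega
  have h8 : m / 8 % 2 = m % 512 / 8 % 2 := by omega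
  have h4 : m / 4 % 2 = m % 512 / 4 % 2 := by omega
  have h2 : m / 2 % 2 = m % 512 / 2 % 2 := by omega
  have h1 : m % 2 = m % 512 % 2 := by omega
  rw [h256, h128, h64, h32, h16, h8, h4, h2, h1]

-- B only reads the low 9 bits of the mode.
theorem B_mod512 (m : Int) : stat_mode_to_rwx_alt m = stat_mode_to_rwx_alt (m % 512) := by
  simp only [stat_mode_to_rwx_alt, List.foldl, band_seven]
  simp only [Int.shiftRight_eq_div_pow]
  norm_num
  have h64 : m / 64 % 8 = m % 512 / 64 % 8 := by omega
  have h8 : m / 8 % 8 = m % 512 / 8 % 8 := by omega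
  rw [h64, h8]

-- Both programs agree on all 512 residues.
set_option maxRecDepth 8192 in
theorem key512 : ∀ n : Nat, n < 512 → stat_mode_to_rwx (n : Int) = stat_mode_to_rwx_alt (n : Int) := by
  decide

-- ===== VERDICT (by name: the statement is the Claim_ definition above) =====
theorem stat_mode_to_rwx_spec : Claim_equal_stat_mode_to_rwx := by
  intro m _
  show stat_mode_to_rwx m = stat_mode_to_rwx_alt m
  rw [A_mod512, B_mod512]
  have h0 : (0:Int) ≤ m % 512 := Int.emod_nonneg _ (by norm_num)
  have h1 : m % 512 < 512 := Int.emod_lt_of_pos _ (by norm_num)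
  have hc : m % 512 = (((m % 512).toNat : Nat) : Int) := by
    simp [Int.toNat_of_nonneg h0]
  rw [hc]
  exact key512 _ (by omega)
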